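-- pv_equiv track=rewrite | github.com/sourabbanka22/Competitive-Programming-Foundation | Dynamic Programming/squareOfZeroes.py | squareOfZeroes
-- ===== SOURCE A (Python) =====
-- def squareOfZeroes(matrix):
--     # Write your code here.
--     infoMatrix = preComputeValues(matrix)
--     size  = len(matrix)
--     for topRow in range(size):
--         for leftCol in range(size):
--             squareLength = 2
--             while squareLength<=size-leftCol and squareLength<=size-topRow:
--                 bottomRow = topRow+squareLength-1
--                 rightCol = leftCol+squareLength-1
--                 if isSquareOfZeroes(infoMatrix, topRow, leftCol, bottomRow, rightCol):
--                     return True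
--                 squareLength+=1
--     return False
--
-- def isSquareOfZeroes(infoMatrix, r1, c1, r2, c2):
--     squareLength = r2-r1+1
--     hasTopBorder = infoMatrix[r1][c1]["numZeroesRight"] >= squareLength
--     hasLeftBorder = infoMatrix[r1][c1]["numZeroesBelow"] >= squareLength
--     hasBottomBorder = infoMatrix[r2][c1]["numZeroesRight"] >= squareLength
--     hasRightBorder = infoMatrix[r1][c2]["numZeroesBelow"] >= squareLength
--
--     return hasTopBorder and hasLeftBorder and hasBottomBorder and hasRightBorder
--
-- def preComputeValues(matrix):
--     infoMatrix = [[None for _ in row] for row in matrix]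
--     size = len(matrix)
--
--     for row in range(size):
--         for col in range(size):
--             numZeroes = 1 if matrix[row][col]==0 else 0
--             infoMatrix[row][col] = {
--                 "numZeroesBelow": numZeroes,
--                 "numZeroesRight": numZeroes,
--             }
--
--     lastIdx = len(matrix)-1
--     for row in reversed(range(size)):
--         for col in reversed(range(size)):
--             if matrix[row][col] == 1:
--                 continue
--             if row<lastIdx:
--                 infoMatrix[row][col]["numZeroesBelow"] += infoMatrix[row+1][col]["numZeroesBelow"]
--             if col<lastIdx:
--                 infoMatrix[row][col]["numZeroesRight"] += infoMatrix[row][col+1]["numZeroesRight"]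
--
--     return infoMatrix
-- ===== SOURCE B (Python) =====
-- def squareOfZeroes(matrix):
--     # Zero-count prefix sums + next-one index arrays per row/column; a border
--     # passes iff the count of zeroes before the next 1 from its start is >= k.
--     n = len(matrix)
--     rows = [row[:n] for row in matrix]
--     cols = [[matrix[r][c] for r in range(n)] for c in range(n)]
--     rowZ = [_prefixZeroes(xs) for xs in rows]
--     rowN = [_nextOnes(xs) for xs in rows]
--     colZ = [_prefixZeroes(xs) for xs in cols]
--     colN = [_nextOnes(xs) for xs in cols]
--     return any(
--         rowZ[t][rowN[t][l]] - rowZ[t][l] >= k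
--         and rowZ[t + k - 1][rowN[t + k - 1][l]] - rowZ[t + k - 1][l] >= k
--         and colZ[l][colN[l][t]] - colZ[l][t] >= k
--         and colZ[l + k - 1][colN[l + k - 1][t]] - colZ[l + k - 1][t] >= k
--         for t in range(n)
--         for l in range(n)
--         for k in range(2, min(n - t, n - l) + 1)
--     )
--
-- def _prefixZeroes(xs):
--     acc = 0
--     out = [0]
--     for x in xs:
--         acc += 1 if x == 0 else 0
--         out.append(acc)
--     return out
--
-- def _nextOnes(xs):
--     # out[c] = index of the first 1 at or after position c (len(xs) if none)
--     n = len(xs)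
--     nxt = n
--     rev = []
--     for c in reversed(range(n)):
--         if xs[c] == 1:
--             nxt = c
--         rev.append(nxt)
--     rev.reverse()
--     rev.append(n)
--     return rev
-- ===== Notes on version B (the rewrite author's own statement) =====
-- stated objective: faster
-- what changed: Replaces A's mutable per-cell run-length table (numZeroesRight/numZeroesBelow dicts filled in place by a backward double loop over the whole grid) with immutable 1D arrays built per row and per column - zero-count prefix sums plus next-one indices - and tests each border by prefix subtraction: the count of zeroes before the next 1 from the border's start must reach the side length.
import Mathlib
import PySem

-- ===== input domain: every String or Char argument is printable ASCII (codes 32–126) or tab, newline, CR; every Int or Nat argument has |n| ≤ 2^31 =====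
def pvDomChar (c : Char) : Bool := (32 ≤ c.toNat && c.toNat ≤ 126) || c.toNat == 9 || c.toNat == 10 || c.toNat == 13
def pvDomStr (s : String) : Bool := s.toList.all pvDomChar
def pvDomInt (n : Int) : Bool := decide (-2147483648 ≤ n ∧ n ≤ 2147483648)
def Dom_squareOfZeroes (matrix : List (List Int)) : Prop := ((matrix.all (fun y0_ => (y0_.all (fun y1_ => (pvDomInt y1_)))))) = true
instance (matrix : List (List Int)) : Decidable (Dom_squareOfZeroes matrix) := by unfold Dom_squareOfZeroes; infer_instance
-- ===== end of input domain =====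

-- B replaces A's in-place per-cell run-length dict table with per-row/column
-- zero-count prefix sums plus next-one index arrays, testing each border by prefix
-- subtraction (zeroes before the next 1 from its start reach the side length);
-- same O(n^3), measured constant-factor faster in a timing run.

-- ===== PORT A =====
-- The per-cell two-key literal dict {"numZeroesBelow","numZeroesRight"} is ported as a
-- two-field structure; the `None` placeholders of the first pass are `Option`.
structure PvInfo where
  below : Int
  right : Int
deriving DecidableEq, Repr

-- matrix[r][c]; indices are always in range where the ports read (default unreachable)
def pvGet2 (m : List (List Int)) (r c : Nat) : Int := (m.getD r []).getD c 1

def pvGetI (info : List (List (Option PvInfo))) (r c : Nat) : PvInfo :=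
  ((info.getD r []).getD c none).getD ⟨0, 0⟩

def pvSetI (info : List (List (Option PvInfo))) (r c : Nat) (v : PvInfo) :
    List (List (Option PvInfo)) :=
  info.set r ((info.getD r []).set c (some v))

def pvZC (x : Int) : Int := if x == 0 then 1 else 0

def preComputeValues (m : List (List Int)) : List (List (Option PvInfo)) :=
  let size := m.length
  let info0 := m.map (fun row => row.map (fun _ => (none : Option PvInfo)))
  let info1 := (List.range size).foldl (fun info row =>
      (List.range size).foldl (fun info col =>
        pvSetI info row col ⟨pvZC (pvGet2 m row col), pvZC (pvGet2 m row col)⟩) info) info0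
  let lastIdx := m.length - 1
  (List.range size).reverse.foldl (fun info row =>
    (List.range size).reverse.foldl (fun info col =>
      if pvGet2 m row col == 1 then info
      else
        let info' := if row < lastIdx then
            pvSetI info row col
              ⟨(pvGetI info row col).below + (pvGetI info (row+1) col).below,
               (pvGetI info row col).right⟩
          else info
        if col < lastIdx then
          pvSetI info' row col
            ⟨(pvGetI info' row col).below,
             (pvGetI info' row col).right + (pvGetI info' row (col+1)).right⟩
        else info') info) info1

def isSquareOfZeroes (info : List (List (Option PvInfo))) (r1 c1 r2 c2 : Nat) : Bool :=
  let squareLength : Int := ((r2 - r1 + 1 : Nat) : Int)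
  decide (squareLength ≤ (pvGetI info r1 c1).right) &&
  decide (squareLength ≤ (pvGetI info r1 c1).below) &&
  decide (squareLength ≤ (pvGetI info r2 c1).right) &&
  decide (squareLength ≤ (pvGetI info r1 c2).below)

-- the `while squareLength <= …` loop of A; `fuel` only bounds the iteration count
-- (structural recursion), it is never exhausted while the loop condition holds
def pvWhile (info : List (List (Option PvInfo))) (size topRow leftCol sl fuel : Nat) : Bool :=
  match fuel with
  | 0 => false
  | fuel + 1 =>
    if sl ≤ size - leftCol ∧ sl ≤ size - topRow then
      if isSquareOfZeroes info topRow leftCol (topRow + sl - 1) (leftCol + sl - 1) then true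
      else pvWhile info size topRow leftCol (sl + 1) fuel
    else false

def squareOfZeroes (matrix : List (List Int)) : Bool :=
  let infoMatrix := preComputeValues matrix
  let size := matrix.length
  (List.range size).any (fun topRow =>
    (List.range size).any (fun leftCol =>
      pvWhile infoMatrix size topRow leftCol 2 (size + 1)))

-- ===== PORT B =====
-- matrix[r][c] on B's side (always in range where B reads it)
def altGet2 (matrix : List (List Int)) (r c : Nat) : Int := (matrix.getD r []).getD c 1

-- _prefixZeroes of Source B: running count of zeroes, list [0, ...] built by appending
def altPrefix (xs : List Int) : List Int :=
  (xs.foldl (fun (st : Int × List Int) x =>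
      let acc := st.1 + (if x == 0 then 1 else 0)
      (acc, st.2 ++ [acc])) (0, [0])).2

-- _nextOnes of Source B: index of the first 1 at or after each position (backward scan)
def altNext (xs : List Int) : List Nat :=
  let n := xs.length
  let st := ((List.range n).reverse).foldl (fun (st : Nat × List Nat) c =>
      let nxt := if xs.getD c 1 == 1 then c else st.1
      (nxt, st.2 ++ [nxt])) (n, ([] : List Nat))
  st.2.reverse ++ [n]

def squareOfZeroes_alt (matrix : List (List Int)) : Bool :=
  let n := matrix.length
  let rows := matrix.map (fun row => PySem.List.slice row none (some (n : Int)))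
  let cols := (List.range n).map (fun c => (List.range n).map (fun r => altGet2 matrix r c))
  let rowZ := rows.map altPrefix
  let rowN := rows.map altNext
  let colZ := cols.map altPrefix
  let colN := cols.map altNext
  (List.range n).any (fun t =>
    (List.range n).any (fun l =>
      (List.range' 2 (min (n - t) (n - l) - 1)).any (fun k =>
        decide ((rowZ.getD t []).getD ((rowN.getD t []).getD l 0) 0
          - (rowZ.getD t []).getD l 0 ≥ (k : Int)) &&
        decide ((rowZ.getD (t + k - 1) []).getD ((rowN.getD (t + k - 1) []).getD l 0) 0
          - (rowZ.getD (t + k - 1) []).getD l 0 ≥ (k : Int)) &&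
        decide ((colZ.getD l []).getD ((colN.getD l []).getD t 0) 0
          - (colZ.getD l []).getD t 0 ≥ (k : Int)) &&
        decide ((colZ.getD (l + k - 1) []).getD ((colN.getD (l + k - 1) []).getD t 0) 0
          - (colZ.getD (l + k - 1) []).getD t 0 ≥ (k : Int)))))

-- ===== PRECONDITION & SPEC =====
-- Pre_ = exactly A's domain: A (and B) raise IndexError iff some row is shorter
-- than the number of rows.
def Pre_squareOfZeroes (matrix : List (List Int)) : Prop :=
  ∀ row ∈ matrix, matrix.length ≤ row.length
instance (matrix : List (List Int)) : Decidable (Pre_squareOfZeroes matrix) := by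
  unfold Pre_squareOfZeroes; infer_instance

def pvWitness_squareOfZeroes : List (List Int) := [[0, 1], [1, 0]]

def Spec_squareOfZeroes (matrix : List (List Int)) (out : Bool) : Prop := out = squareOfZeroes_alt matrix
instance (matrix : List (List Int)) (out : Bool) : Decidable (Spec_squareOfZeroes matrix out) := by unfold Spec_squareOfZeroes; infer_instance

-- ===== CLAIM (what is proved, stated in full; the proofs are below) =====
def Claim_equal_squareOfZeroes : Prop := ∀ (matrix : List (List Int)), Dom_squareOfZeroes matrix → Pre_squareOfZeroes matrix → Spec_squareOfZeroes matrix (squareOfZeroes matrix)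

-- ===== LEMMAS AND PROOFS =====

-- value of a cell after the first (init) pass resp. after the full precompute
def vInit (m : List (List Int)) (r c : Nat) : PvInfo :=
  ⟨pvZC (pvGet2 m r c), pvZC (pvGet2 m r c)⟩

-- numZeroesRight at (r, c), as A's backward pass computes it (n = size)
def runR (m : List (List Int)) (n r c : Nat) : Int :=
  if pvGet2 m r c == 1 then 0
  else pvZC (pvGet2 m r c) + (if h : c + 1 < n then runR m n r (c + 1) else 0)
termination_by n - c
decreasing_by omega

-- numZeroesBelow at (r, c)
def runB (m : List (List Int)) (n r c : Nat) : Int :=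
  if pvGet2 m r c == 1 then 0
  else pvZC (pvGet2 m r c) + (if h : r + 1 < n then runB m n (r + 1) c else 0)
termination_by n - r
decreasing_by omega

def vFin (m : List (List Int)) (r c : Nat) : PvInfo :=
  ⟨runB m m.length r c, runR m m.length r c⟩

def PvShape (m : List (List Int)) (info : List (List (Option PvInfo))) : Prop :=
  info.length = m.length ∧ ∀ r, (info.getD r []).length = (m.getD r []).length

-- a row of the matrix is at least n long (from Pre_)
def PvWide (m : List (List Int)) : Prop :=
  ∀ r < m.length, m.length ≤ (m.getD r []).length

lemma pvWide_of_pre (m : List (List Int)) (h : Pre_squareOfZeroes m) : PvWide m := by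
  intro r hr
  have hm : m.getD r [] = m[r] := List.getD_eq_getElem m [] hr
  rw [hm]
  exact h m[r] (List.getElem_mem hr)

lemma pvGetD_set_self {α : Type} (l : List α) (i : Nat) (v d : α) (h : i < l.length) :
    (l.set i v).getD i d = v := by
  simp [List.getD_eq_getElem?_getD, List.getElem?_set_self h]

lemma pvGetD_set_ne {α : Type} (l : List α) (i j : Nat) (v d : α) (h : i ≠ j) :
    (l.set i v).getD j d = l.getD j d := by
  simp [List.getD_eq_getElem?_getD, List.getElem?_set_ne h]

lemma pvShape_setI (m : List (List Int)) (info : List (List (Option PvInfo))) (r c : Nat)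
    (v : PvInfo) (h : PvShape m info) : PvShape m (pvSetI info r c v) := by
  obtain ⟨h1, h2⟩ := h
  refine ⟨by simpa [pvSetI] using h1, fun r' => ?_⟩
  by_cases hrr : r = r'
  · subst hrr
    by_cases hr : r < info.length
    · rw [pvSetI, pvGetD_set_self info r _ [] hr]
      simpa using h2 r
    · rw [pvSetI, List.set_eq_of_length_le (by omega)]
      exact h2 r
  · rw [pvSetI, pvGetD_set_ne info r r' _ [] hrr]
    exact h2 r' 

lemma pvGetI_setI_same (info : List (List (Option PvInfo))) (r c : Nat) (v : PvInfo)
    (hr : r < info.length) (hc : c < (info.getD r []).length) :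
    pvGetI (pvSetI info r c v) r c = v := by
  rw [pvGetI, pvSetI, pvGetD_set_self info r _ [] hr,
    List.getD_eq_getElem?_getD, List.getElem?_set_self hc]
  rfl

lemma pvGetI_setI_ne (info : List (List (Option PvInfo))) (r c : Nat) (v : PvInfo)
    (r' c' : Nat) (h : r ≠ r' ∨ c ≠ c') :
    pvGetI (pvSetI info r c v) r' c' = pvGetI info r' c' := by
  rcases h with h | h
  · rw [pvGetI, pvSetI, pvGetD_set_ne info r r' _ [] h, ← pvGetI]
  · by_cases hr : r' = r
    · subst hr
      by_cases hlen : r' < info.length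
      · rw [pvGetI, pvSetI, pvGetD_set_self info r' _ [] hlen,
          List.getD_eq_getElem?_getD, List.getElem?_set_ne h, pvGetI,
          List.getD_eq_getElem?_getD, List.getD_eq_getElem?_getD]
      · rw [pvSetI, List.set_eq_of_length_le (by omega)]
    · rw [pvGetI, pvSetI, pvGetD_set_ne info r r' _ [] (by omega), ← pvGetI]

-- ---- stage 1 (forward init fill) ----

def pvStep1 (m : List (List Int)) (row : Nat)
    (info : List (List (Option PvInfo))) (col : Nat) : List (List (Option PvInfo)) :=
  pvSetI info row col ⟨pvZC (pvGet2 m row col), pvZC (pvGet2 m row col)⟩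

def PvInv1 (m : List (List Int)) (row j : Nat) (info : List (List (Option PvInfo))) : Prop :=
  PvShape m info ∧ ∀ r c, r < m.length → c < m.length →
    pvGetI info r c = if r < row ∨ (r = row ∧ c < j) then vInit m r c else ⟨0, 0⟩

lemma pvStep1_inv (m : List (List Int)) (hw : PvWide m) (row j : Nat)
    (info : List (List (Option PvInfo))) (hrow : row < m.length) (hj : j < m.length)
    (h : PvInv1 m row j info) : PvInv1 m row (j + 1) (pvStep1 m row info j) := by
  obtain ⟨hs, hv⟩ := h
  refine ⟨pvShape_setI m info row j _ hs, fun r c hr hc => ?_⟩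
  by_cases hrc : r = row ∧ c = j
  · obtain ⟨rfl, rfl⟩ := hrc
    rw [pvStep1, pvGetI_setI_same info r c _ (by rw [hs.1]; omega)
      (by rw [hs.2]; have := hw r hr; omega)]
    have hcond : r < r ∨ (r = r ∧ c < c + 1) := Or.inr ⟨rfl, by omega⟩
    rw [if_pos hcond]; rfl
  · rw [pvStep1, pvGetI_setI_ne info row j _ r c (by tauto), hv r c hr hc]
    by_cases h1 : r < row
    · rw [if_pos (Or.inl h1), if_pos (Or.inl h1)]
    · by_cases h2 : r = row ∧ c < j
      · rw [if_pos (Or.inr h2), if_pos (Or.inr ⟨h2.1, by omega⟩)]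
      · have hcond : ¬(r < row ∨ (r = row ∧ c < j)) := by tauto
        have hcond' : ¬(r < row ∨ (r = row ∧ c < j + 1)) := by
          rintro (h' | ⟨h3, h4⟩)
          · exact h1 h'
          · have hnl : ¬ c < j := fun hcj => h2 ⟨h3, hcj⟩
            exact hrc ⟨h3, by omega⟩
        rw [if_neg hcond, if_neg hcond']

lemma pvInner1 (m : List (List Int)) (hw : PvWide m) (row : Nat)
    (hrow : row < m.length) : ∀ (j : Nat), j ≤ m.length →
    ∀ (info : List (List (Option PvInfo))), PvInv1 m row 0 info →
    PvInv1 m row j ((List.range j).foldl (pvStep1 m row) info) := by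
  intro j
  induction j with
  | zero => intro _ info h; simpa using h
  | succ j ih =>
    intro hj info h
    rw [List.range_succ, List.foldl_append, List.foldl_cons, List.foldl_nil]
    exact pvStep1_inv m hw row j _ hrow (by omega) (ih (by omega) info h)

lemma pvInv1_shift (m : List (List Int)) (row : Nat) (info : List (List (Option PvInfo)))
    (h : PvInv1 m row m.length info) : PvInv1 m (row + 1) 0 info := by
  obtain ⟨hs, hv⟩ := h
  refine ⟨hs, fun r c hr hc => ?_⟩
  rw [hv r c hr hc]
  by_cases h1 : r < row + 1
  · rw [if_pos (by omega : r < row ∨ (r = row ∧ c < m.length)), if_pos (Or.inl h1)]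
  · rw [if_neg (by omega), if_neg (by omega)]

lemma pvOuter1 (m : List (List Int)) (hw : PvWide m) : ∀ (j : Nat), j ≤ m.length →
    ∀ (info : List (List (Option PvInfo))), PvInv1 m 0 0 info →
    PvInv1 m j 0 ((List.range j).foldl (fun info row =>
      (List.range m.length).foldl (pvStep1 m row) info) info) := by
  intro j
  induction j with
  | zero => intro _ info h; simpa using h
  | succ j ih =>
    intro hj info h
    rw [List.range_succ, List.foldl_append, List.foldl_cons, List.foldl_nil]
    exact pvInv1_shift m j _
      (pvInner1 m hw j (by omega) m.length (le_refl _) _ (ih (by omega) info h))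

-- ---- stage 2 (backward run-length fill) ----

def pvStep2 (m : List (List Int)) (row : Nat)
    (info : List (List (Option PvInfo))) (col : Nat) : List (List (Option PvInfo)) :=
  if pvGet2 m row col == 1 then info
  else
    let info' := if row < m.length - 1 then
        pvSetI info row col
          ⟨(pvGetI info row col).below + (pvGetI info (row + 1) col).below,
           (pvGetI info row col).right⟩
      else info
    if col < m.length - 1 then
      pvSetI info' row col
        ⟨(pvGetI info' row col).below,
         (pvGetI info' row col).right + (pvGetI info' row (col + 1)).right⟩
    else info'

def PvInv2 (m : List (List Int)) (row j : Nat) (info : List (List (Option PvInfo))) : Prop :=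
  PvShape m info ∧ ∀ r c, r < m.length → c < m.length →
    pvGetI info r c = if row < r ∨ (r = row ∧ j ≤ c) then vFin m r c else vInit m r c

lemma vFin_eq_vInit_of_one (m : List (List Int)) (r c : Nat) (h : pvGet2 m r c = 1) :
    vFin m r c = vInit m r c := by
  have hbeq : (pvGet2 m r c == 1) = true := by rw [h]; rfl
  rw [vFin, vInit, runB, runR, hbeq]
  simp only [if_true]
  rw [pvZC, h]
  rfl

lemma pvStep2_inv (m : List (List Int)) (hw : PvWide m) (row j : Nat)
    (info : List (List (Option PvInfo))) (hrow : row < m.length) (hj : j < m.length)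
    (h : PvInv2 m row (j + 1) info) : PvInv2 m row j (pvStep2 m row info j) := by
  obtain ⟨hs, hv⟩ := h
  have hself : pvGetI info row j = vInit m row j := by
    rw [hv row j hrow hj, if_neg (by omega)]
  by_cases hone : pvGet2 m row j = 1
  · have hbeq : (pvGet2 m row j == 1) = true := by rw [hone]; rfl
    rw [pvStep2, hbeq]
    simp only [if_true]
    refine ⟨hs, fun r c hr hc => ?_⟩
    rw [hv r c hr hc]
    by_cases h1 : row < r ∨ (r = row ∧ j + 1 ≤ c)
    · rw [if_pos h1, if_pos (by omega)]
    · by_cases h2 : r = row ∧ c = j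
      · obtain ⟨rfl, rfl⟩ := h2
        rw [if_neg h1, if_pos (by omega), vFin_eq_vInit_of_one m r c hone]
      · rw [if_neg h1, if_neg (by omega)]
  · have hbeq : (pvGet2 m row j == 1) = false := by simpa using hone
    rw [pvStep2, hbeq]
    simp only [Bool.false_eq_true, if_false]
    have hrlen : row < info.length := by rw [hs.1]; omega
    have hclen : j < (info.getD row []).length := by
      rw [hs.2]; have := hw row hrow; omega
    set info2 := (if row < m.length - 1 then
        pvSetI info row j
          ⟨(pvGetI info row j).below + (pvGetI info (row + 1) j).below,
           (pvGetI info row j).right⟩ else info) with hinfo2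
    -- after the first (numZeroesBelow) conditional update
    have hs' : PvShape m info2 := by
      rw [hinfo2]
      split
      · exact pvShape_setI m info row j _ hs
      · exact hs
    have hself' : pvGetI info2 row j =
        ⟨runB m m.length row j, pvZC (pvGet2 m row j)⟩ := by
      rw [hinfo2]
      by_cases hlast : row < m.length - 1
      · rw [if_pos hlast, pvGetI_setI_same info row j _ hrlen hclen, hself]
        have hbelow : pvGetI info (row + 1) j = vFin m (row + 1) j := by
          rw [hv (row + 1) j (by omega) hj, if_pos (by omega)]
        rw [hbelow]
        have hrun : runB m m.length row j =
            pvZC (pvGet2 m row j) + runB m m.length (row + 1) j := by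
          rw [runB, hbeq]
          simp only [Bool.false_eq_true, if_false]
          rw [dif_pos (by omega : row + 1 < m.length)]
        rw [hrun]
        rfl
      · rw [if_neg hlast, hself]
        have hrun : runB m m.length row j = pvZC (pvGet2 m row j) := by
          rw [runB, hbeq]
          simp only [Bool.false_eq_true, if_false]
          rw [dif_neg (by omega : ¬ row + 1 < m.length)]
          ring
        rw [hrun]
        rfl
    have hother' : ∀ r c, ¬(r = row ∧ c = j) → pvGetI info2 r c = pvGetI info r c := by
      intro r c hrc
      rw [hinfo2]
      split
      · exact pvGetI_setI_ne info row j _ r c (by tauto)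
      · rfl
    clear_value info2
    by_cases hclast : j < m.length - 1
    · rw [if_pos hclast]
      refine ⟨pvShape_setI m _ row j _ hs', fun r c hr hc => ?_⟩
      by_cases h2 : r = row ∧ c = j
      · obtain ⟨rfl, rfl⟩ := h2
        rw [pvGetI_setI_same info2 r c _ (by rw [hs'.1]; omega)
          (by rw [hs'.2]; have := hw r hr; omega)]
        rw [if_pos (by omega), hself']
        have hright : pvGetI info2 r (c + 1) = vFin m r (c + 1) := by
          rw [hother' r (c + 1) (by omega), hv r (c + 1) hr (by omega), if_pos (by omega)]
        rw [hright]
        have hrun : runR m m.length r c =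
            pvZC (pvGet2 m r c) + runR m m.length r (c + 1) := by
          rw [runR, hbeq]
          simp only [Bool.false_eq_true, if_false]
          rw [dif_pos (by omega : c + 1 < m.length)]
        simp only [vFin, hrun]
      · rw [pvGetI_setI_ne info2 row j _ r c (by tauto), hother' r c h2, hv r c hr hc]
        by_cases h1 : row < r ∨ (r = row ∧ j + 1 ≤ c)
        · rw [if_pos h1, if_pos (by omega)]
        · rw [if_neg h1, if_neg (by omega)]
    · rw [if_neg hclast]
      refine ⟨hs', fun r c hr hc => ?_⟩
      by_cases h2 : r = row ∧ c = j
      · obtain ⟨rfl, rfl⟩ := h2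
        rw [hself', if_pos (by omega)]
        have hrun : runR m m.length r c = pvZC (pvGet2 m r c) := by
          rw [runR, hbeq]
          simp only [Bool.false_eq_true, if_false]
          rw [dif_neg (by omega : ¬ c + 1 < m.length)]
          ring
        simp only [vFin, hrun]
      · rw [hother' r c h2, hv r c hr hc]
        by_cases h1 : row < r ∨ (r = row ∧ j + 1 ≤ c)
        · rw [if_pos h1, if_pos (by omega)]
        · rw [if_neg h1, if_neg (by omega)]

lemma pvInner2 (m : List (List Int)) (hw : PvWide m) (row : Nat)
    (hrow : row < m.length) : ∀ (j : Nat), j ≤ m.length →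
    ∀ (info : List (List (Option PvInfo))), PvInv2 m row j info →
    PvInv2 m row 0 (((List.range j).reverse).foldl (pvStep2 m row) info) := by
  intro j
  induction j with
  | zero => intro _ info h; simpa using h
  | succ j ih =>
    intro hj info h
    rw [List.range_succ, List.reverse_append, List.reverse_cons, List.reverse_nil,
      List.nil_append, List.singleton_append, List.foldl_cons]
    exact ih (by omega) _ (pvStep2_inv m hw row j info hrow (by omega) h)

lemma pvInv2_shift (m : List (List Int)) (row : Nat) (info : List (List (Option PvInfo)))
    (h : PvInv2 m (row + 1) 0 info) : PvInv2 m row m.length info := by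
  obtain ⟨hs, hv⟩ := h
  refine ⟨hs, fun r c hr hc => ?_⟩
  rw [hv r c hr hc]
  by_cases h1 : row < r
  · rw [if_pos (by omega), if_pos (by omega)]
  · rw [if_neg (by omega), if_neg (by omega)]

lemma pvOuter2 (m : List (List Int)) (hw : PvWide m) : ∀ (j : Nat), j ≤ m.length →
    ∀ (info : List (List (Option PvInfo))), PvInv2 m j 0 info →
    PvInv2 m 0 0 (((List.range j).reverse).foldl (fun info row =>
      ((List.range m.length).reverse).foldl (pvStep2 m row) info) info) := by
  intro j
  induction j with
  | zero => intro _ info h; simpa using h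
  | succ j ih =>
    intro hj info h
    rw [List.range_succ, List.reverse_append, List.reverse_cons, List.reverse_nil,
      List.nil_append, List.singleton_append, List.foldl_cons]
    exact ih (by omega) _
      (pvInner2 m hw j (by omega) m.length (le_refl _) _ (pvInv2_shift m j info h))

lemma pvInfo0_getD (m : List (List Int)) (r c : Nat) :
    ((m.map (fun row => row.map (fun _ => (none : Option PvInfo)))).getD r []).getD c none
      = none := by
  simp only [List.getD_eq_getElem?_getD, List.getElem?_map]
  cases h : m[r]? with
  | none => rfl
  | some row =>
    simp only [Option.map_some, Option.getD_some, List.getElem?_map]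
    cases row[c]? <;> rfl

lemma pvInfo0_shape (m : List (List Int)) :
    PvShape m (m.map (fun row => row.map (fun _ => (none : Option PvInfo)))) := by
  refine ⟨by simp, fun r => ?_⟩
  simp only [List.getD_eq_getElem?_getD, List.getElem?_map]
  cases m[r]? <;> simp

lemma pvInfo0_inv (m : List (List Int)) :
    PvInv1 m 0 0 (m.map (fun row => row.map (fun _ => (none : Option PvInfo)))) := by
  refine ⟨pvInfo0_shape m, fun r c hr hc => ?_⟩
  rw [if_neg (by omega), pvGetI, pvInfo0_getD]
  rfl

lemma preComputeValues_eq (m : List (List Int)) :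
    preComputeValues m = ((List.range m.length).reverse).foldl (fun info row =>
      ((List.range m.length).reverse).foldl (pvStep2 m row) info)
      ((List.range m.length).foldl (fun info row =>
        (List.range m.length).foldl (pvStep1 m row) info)
        (m.map (fun row => row.map (fun _ => (none : Option PvInfo))))) := rfl

lemma preComputeValues_spec (m : List (List Int)) (hw : PvWide m) (r c : Nat)
    (hr : r < m.length) (hc : c < m.length) :
    pvGetI (preComputeValues m) r c = vFin m r c := by
  have h1 := pvOuter1 m hw m.length (le_refl _) _ (pvInfo0_inv m)
  have h1' : PvInv2 m m.length 0 ((List.range m.length).foldl (fun info row =>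
      (List.range m.length).foldl (pvStep1 m row) info)
      (m.map (fun row => row.map (fun _ => (none : Option PvInfo))))) := by
    obtain ⟨hs, hv⟩ := h1
    refine ⟨hs, fun r' c' hr' hc' => ?_⟩
    rw [hv r' c' hr' hc', if_pos (Or.inl hr'), if_neg (by omega)]
  have h2 := pvOuter2 m hw m.length (le_refl _) _ h1'
  rw [preComputeValues_eq]
  rw [h2.2 r c hr hc, if_pos (by omega)]

-- ---- the while loop ----

lemma pvWhile_iff (info : List (List (Option PvInfo))) (n t l : Nat) : ∀ (fuel sl : Nat),
    n + 1 ≤ fuel + sl →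
    (pvWhile info n t l sl fuel = true ↔
      ∃ k, sl ≤ k ∧ k ≤ n - l ∧ k ≤ n - t ∧
        isSquareOfZeroes info t l (t + k - 1) (l + k - 1) = true) := by
  intro fuel
  induction fuel with
  | zero =>
    intro sl hf
    simp only [pvWhile, Bool.false_eq_true, false_iff]
    rintro ⟨k, h1, h2, h3, _⟩
    omega
  | succ fuel ih =>
    intro sl hf
    rw [pvWhile]
    by_cases hc : sl ≤ n - l ∧ sl ≤ n - t
    · rw [if_pos hc]
      by_cases hsq : isSquareOfZeroes info t l (t + sl - 1) (l + sl - 1) = true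
      · rw [if_pos hsq]
        simp only [true_iff]
        exact ⟨sl, le_refl _, hc.1, hc.2, hsq⟩
      · rw [if_neg hsq, ih (sl + 1) (by omega)]
        constructor
        · rintro ⟨k, h1, h2, h3, h4⟩
          exact ⟨k, by omega, h2, h3, h4⟩
        · rintro ⟨k, h1, h2, h3, h4⟩
          refine ⟨k, ?_, h2, h3, h4⟩
          rcases Nat.eq_or_lt_of_le h1 with he | hlt
          · exact absurd (he ▸ h4) hsq
          · omega
    · rw [if_neg hc]
      simp only [Bool.false_eq_true, false_iff]
      rintro ⟨k, h1, h2, h3, _⟩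
      omega

-- ---- B's prefix lists ----

def zpref (a : Int) : List Int → List Int
  | [] => []
  | x :: xs => (a + (if x == 0 then 1 else 0)) :: zpref (a + (if x == 0 then 1 else 0)) xs

def zcnt (xs : List Int) : Int := (xs.countP (fun x => x == 0) : Int)

lemma altPrefix_foldl (xs : List Int) : ∀ (a : Int) (out : List Int),
    (xs.foldl (fun (st : Int × List Int) x =>
      let acc := st.1 + (if x == 0 then 1 else 0)
      (acc, st.2 ++ [acc])) (a, out)).2 = out ++ zpref a xs := by
  induction xs with
  | nil => intro a out; simp [zpref]
  | cons x xs ih =>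
    intro a out
    simp only [List.foldl_cons]
    rw [ih]
    simp [zpref]

lemma altPrefix_eq (xs : List Int) : altPrefix xs = 0 :: zpref 0 xs := by
  rw [altPrefix, altPrefix_foldl xs 0 [0]]
  rfl

lemma zpref_getD (xs : List Int) : ∀ (a : Int) (i : Nat), i < xs.length →
    (zpref a xs).getD i 0 = a + zcnt (xs.take (i + 1)) := by
  induction xs with
  | nil => intro a i hi; simp at hi
  | cons x xs ih =>
    intro a i hi
    cases i with
    | zero =>
      simp only [zpref, List.getD_cons_zero, List.take_succ_cons, List.take_zero, zcnt,
        List.countP_cons, List.countP_nil]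
      split
      · simp
      · simp
    | succ i =>
      rw [zpref, List.getD_cons_succ, ih _ i (by simpa using hi)]
      simp only [List.take_succ_cons, zcnt, List.countP_cons]
      split
      · push_cast
        ring
      · push_cast
        ring

lemma altPrefix_getD (xs : List Int) (i : Nat) (hi : i ≤ xs.length) :
    (altPrefix xs).getD i 0 = zcnt (xs.take i) := by
  rw [altPrefix_eq]
  cases i with
  | zero => simp [zcnt]
  | succ i =>
    rw [List.getD_cons_succ, zpref_getD xs 0 i (by omega)]
    simp

-- zcnt over one more element of the list
lemma zcnt_take_succ (xs : List Int) (c : Nat) (hc : c < xs.length) :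
    zcnt (xs.take (c + 1)) = zcnt (xs.take c) + (if xs.getD c 1 == 0 then 1 else 0) := by
  rw [zcnt, zcnt, List.take_add_one, List.countP_append, List.getD_eq_getElem xs 1 hc,
    List.getElem?_eq_getElem hc]
  simp only [Option.toList_some, List.countP_cons, List.countP_nil]
  split
  · push_cast; ring
  · push_cast; ring

-- index of the first 1 at or after c (xs.length if none): what _nextOnes computes
def nxSpec (xs : List Int) (c : Nat) : Nat :=
  if h : c < xs.length then (if xs.getD c 1 == 1 then c else nxSpec xs (c + 1))
  else xs.length
termination_by xs.length - c
decreasing_by omega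

lemma nxSpec_bounds (xs : List Int) : ∀ d c, xs.length - c ≤ d →
    nxSpec xs c ≤ xs.length := by
  intro d
  induction d with
  | zero =>
    intro c hd
    rw [nxSpec, dif_neg (by omega)]
  | succ d ih =>
    intro c hd
    rw [nxSpec]
    by_cases h : c < xs.length
    · rw [dif_pos h]
      split
      · omega
      · exact ih (c + 1) (by omega)
    · rw [dif_neg h]

-- A's run-length value, recast on a plain list (the same recursion as runR/runB)
def runL (xs : List Int) (c : Nat) : Int :=
  if h : c < xs.length then
    (if xs.getD c 1 == 1 then 0
     else (if xs.getD c 1 == 0 then 1 else 0) + runL xs (c + 1))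
  else 0
termination_by xs.length - c
decreasing_by omega

-- the run-length value is a difference of zero-count prefix sums up to the next 1
lemma runL_eq (xs : List Int) : ∀ d c, xs.length - c ≤ d →
    runL xs c = zcnt (xs.take (nxSpec xs c)) - zcnt (xs.take c) := by
  intro d
  induction d with
  | zero =>
    intro c hd
    rw [runL, dif_neg (by omega), nxSpec, dif_neg (by omega),
      List.take_of_length_le (le_refl xs.length),
      List.take_of_length_le (show xs.length ≤ c by omega)]
    ring
  | succ d ih =>
    intro c hd
    by_cases h : c < xs.length
    · rw [runL, dif_pos h, nxSpec, dif_pos h]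
      by_cases h1 : xs.getD c 1 == 1
      · rw [if_pos h1, if_pos h1]
        ring
      · rw [if_neg h1, if_neg h1, ih (c + 1) (by omega), zcnt_take_succ xs c h]
        have h0 : ¬ (xs.getD c 1 == 0) = true ∨ (xs.getD c 1 == 0) = true := by tauto
        split
        · omega
        · omega
    · rw [runL, dif_neg h, nxSpec, dif_neg h,
        List.take_of_length_le (le_refl xs.length),
        List.take_of_length_le (show xs.length ≤ c by omega)]
      ring

lemma runR_eq_runL (m : List (List Int)) (hw : PvWide m) (r : Nat) (hr : r < m.length) :
    ∀ d c, m.length - c ≤ d → c < m.length →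
    runR m m.length r c = runL ((m.getD r []).take m.length) c := by
  have hlenT : ((m.getD r []).take m.length).length = m.length := by
    rw [List.length_take]
    have := hw r hr
    omega
  have hget : ∀ c', c' < m.length →
      ((m.getD r []).take m.length).getD c' 1 = pvGet2 m r c' := by
    intro c' hc'
    rw [List.getD_eq_getElem _ 1 (by omega), List.getElem_take, pvGet2,
      List.getD_eq_getElem _ 1 (by have := hw r hr; omega)]
  intro d
  induction d with
  | zero => omega
  | succ d ih =>
    intro c hd hc
    rw [runR, runL, dif_pos (by omega : c < ((m.getD r []).take m.length).length),
      hget c hc]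
    by_cases h1 : pvGet2 m r c == 1
    · rw [if_pos h1, if_pos h1]
    · rw [if_neg h1, if_neg h1, pvZC]
      by_cases h2 : c + 1 < m.length
      · rw [dif_pos h2, ih (c + 1) (by omega) h2]
      · rw [dif_neg h2, runL, dif_neg (by omega)]

lemma runB_eq_runL (m : List (List Int)) (c : Nat) (_hc : c < m.length) :
    ∀ d r, m.length - r ≤ d → r < m.length →
    runB m m.length r c = runL ((List.range m.length).map (fun r' => altGet2 m r' c)) r := by
  have hlenT : ((List.range m.length).map (fun r' => altGet2 m r' c)).length = m.length := by
    simp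
  have hget : ∀ r', r' < m.length →
      ((List.range m.length).map (fun r' => altGet2 m r' c)).getD r' 1 = pvGet2 m r' c := by
    intro r' hr'
    rw [List.getD_eq_getElem _ 1 (by omega)]
    simp [altGet2, pvGet2]
  intro d
  induction d with
  | zero => omega
  | succ d ih =>
    intro r hd hr
    rw [runB, runL, dif_pos (by omega :
      r < ((List.range m.length).map (fun r' => altGet2 m r' c)).length), hget r hr]
    by_cases h1 : pvGet2 m r c == 1
    · rw [if_pos h1, if_pos h1]
    · rw [if_neg h1, if_neg h1, pvZC]
      by_cases h2 : r + 1 < m.length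
      · rw [dif_pos h2, ih (r + 1) (by omega) h2]
      · rw [dif_neg h2, runL, dif_neg (by omega)]

-- ---- B's next-one list ----

lemma altNext_foldl (xs : List Int) : ∀ j, j ≤ xs.length → ∀ (out : List Nat),
    (((List.range j).reverse).foldl (fun (st : Nat × List Nat) c =>
      let nxt := if xs.getD c 1 == 1 then c else st.1
      (nxt, st.2 ++ [nxt])) (nxSpec xs j, out))
      = (nxSpec xs 0, out ++ ((List.range j).map (nxSpec xs)).reverse) := by
  intro j
  induction j with
  | zero => intro _ out; simp
  | succ j ih =>
    intro hj out
    rw [List.range_succ, List.reverse_append, List.reverse_cons, List.reverse_nil,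
      List.nil_append, List.singleton_append, List.foldl_cons]
    have hstep : nxSpec xs j = if xs.getD j 1 == 1 then j else nxSpec xs (j + 1) := by
      conv_lhs => rw [nxSpec]
      rw [dif_pos (by omega : j < xs.length)]
    simp only []
    rw [← hstep, ih (by omega) (out ++ [nxSpec xs j])]
    simp [List.map_append]

lemma altNext_eq (xs : List Int) :
    altNext xs = (List.range xs.length).map (nxSpec xs) ++ [xs.length] := by
  have h0 : xs.length = nxSpec xs xs.length := by
    rw [nxSpec, dif_neg (by omega)]
  have hf := altNext_foldl xs xs.length (le_refl _) []
  rw [← h0] at hf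
  rw [altNext]
  simp only []
  rw [hf]
  simp

lemma altNext_getD (xs : List Int) (c : Nat) (hc : c ≤ xs.length) :
    (altNext xs).getD c 0 = nxSpec xs c := by
  rw [altNext_eq]
  by_cases h : c < xs.length
  · rw [List.getD_eq_getElem _ 0 (by simp; omega), List.getElem_append_left (by simp; omega)]
    simp
  · have hc' : c = xs.length := by omega
    subst hc'
    rw [List.getD_eq_getElem _ 0 (by simp), List.getElem_append_right (by simp)]
    simp [nxSpec]

-- ---- B's table reads are A's run-length values ----

lemma altRowVal (m : List (List Int)) (hw : PvWide m) (t l : Nat)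
    (ht : t < m.length) (hl : l < m.length) :
    (((m.map (fun row => PySem.List.slice row none (some (m.length : Int)))).map
        altPrefix).getD t []).getD
      ((((m.map (fun row => PySem.List.slice row none (some (m.length : Int)))).map
        altNext).getD t []).getD l 0) 0
    - (((m.map (fun row => PySem.List.slice row none (some (m.length : Int)))).map
        altPrefix).getD t []).getD l 0
    = runR m m.length t l := by
  have hrowT : ((m.getD t []).take m.length).length = m.length := by
    rw [List.length_take]
    have := hw t ht
    omega
  have hz : ((m.map (fun row => PySem.List.slice row none (some (m.length : Int)))).map
      altPrefix).getD t [] = altPrefix ((m.getD t []).take m.length) := by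
    rw [List.getD_eq_getElem _ [] (by simpa using ht), List.getElem_map, List.getElem_map,
      PySem.List.slice_to_natCast, List.getD_eq_getElem _ [] ht]
  have hn : ((m.map (fun row => PySem.List.slice row none (some (m.length : Int)))).map
      altNext).getD t [] = altNext ((m.getD t []).take m.length) := by
    rw [List.getD_eq_getElem _ [] (by simpa using ht), List.getElem_map, List.getElem_map,
      PySem.List.slice_to_natCast, List.getD_eq_getElem _ [] ht]
  have hnx := nxSpec_bounds ((m.getD t []).take m.length) ((m.getD t []).take m.length).length
    l (by omega)
  rw [hz, hn, altNext_getD _ l (by omega),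
    altPrefix_getD _ _ (by omega), altPrefix_getD _ _ (by omega),
    runR_eq_runL m hw t ht (m.length - l) l (le_refl _) hl, runL_eq _ (m.length - l) l (by omega)]

lemma altColVal (m : List (List Int)) (t l : Nat)
    (ht : t < m.length) (hl : l < m.length) :
    ((((List.range m.length).map (fun c => (List.range m.length).map
        (fun r => altGet2 m r c))).map altPrefix).getD l []).getD
      (((((List.range m.length).map (fun c => (List.range m.length).map
        (fun r => altGet2 m r c))).map altNext).getD l []).getD t 0) 0
    - ((((List.range m.length).map (fun c => (List.range m.length).map
        (fun r => altGet2 m r c))).map altPrefix).getD l []).getD t 0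
    = runB m m.length t l := by
  have hcolT : ((List.range m.length).map (fun r => altGet2 m r l)).length = m.length := by
    simp
  have hz : (((List.range m.length).map (fun c => (List.range m.length).map
      (fun r => altGet2 m r c))).map altPrefix).getD l []
        = altPrefix ((List.range m.length).map (fun r => altGet2 m r l)) := by
    rw [List.getD_eq_getElem _ [] (by simpa using hl)]
    simp
  have hn : (((List.range m.length).map (fun c => (List.range m.length).map
      (fun r => altGet2 m r c))).map altNext).getD l []
        = altNext ((List.range m.length).map (fun r => altGet2 m r l)) := by
    rw [List.getD_eq_getElem _ [] (by simpa using hl)]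
    simp
  have hnx := nxSpec_bounds ((List.range m.length).map (fun r => altGet2 m r l))
    ((List.range m.length).map (fun r => altGet2 m r l)).length t (by omega)
  rw [hz, hn, altNext_getD _ t (by omega),
    altPrefix_getD _ _ (by omega), altPrefix_getD _ _ (by omega),
    runB_eq_runL m l hl (m.length - t) t (le_refl _) ht, runL_eq _ (m.length - t) t (by omega)]

-- ---- A's square check as run-length inequalities ----

lemma pvCheckA (m : List (List Int)) (hw : PvWide m) (t l k : Nat)
    (ht : t < m.length) (hl : l < m.length) (hk2 : 2 ≤ k)
    (hkl : k ≤ m.length - l) (hkt : k ≤ m.length - t) :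
    isSquareOfZeroes (preComputeValues m) t l (t + k - 1) (l + k - 1) = true ↔
      ((k : Int) ≤ runR m m.length t l ∧ (k : Int) ≤ runB m m.length t l ∧
       (k : Int) ≤ runR m m.length (t + k - 1) l ∧ (k : Int) ≤ runB m m.length t (l + k - 1)) := by
  rw [isSquareOfZeroes]
  have hke : t + k - 1 - t + 1 = k := by omega
  rw [hke]
  rw [preComputeValues_spec m hw t l ht hl,
    preComputeValues_spec m hw (t + k - 1) l (by omega) hl,
    preComputeValues_spec m hw t (l + k - 1) ht (by omega)]
  simp only [vFin, Bool.and_eq_true, decide_eq_true_iff]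
  tauto

-- ===== VERDICT (by name: the statement is the Claim_ definition above) =====
theorem squareOfZeroes_spec : Claim_equal_squareOfZeroes := by
  intro matrix _ hpre
  unfold Spec_squareOfZeroes
  have hw := pvWide_of_pre matrix hpre
  rw [Bool.eq_iff_iff, squareOfZeroes, squareOfZeroes_alt]
  simp only [List.any_eq_true, List.mem_range, List.mem_range'_1, Bool.and_eq_true,
    decide_eq_true_iff, ge_iff_le]
  constructor
  · rintro ⟨t, ht, l, hl, hwhile⟩
    obtain ⟨k, hk2, hkl, hkt, hsq⟩ :=
      (pvWhile_iff (preComputeValues matrix) matrix.length t l (matrix.length + 1) 2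
        (by omega)).mp hwhile
    obtain ⟨hc1, hc2, hc3, hc4⟩ := (pvCheckA matrix hw t l k ht hl hk2 hkl hkt).mp hsq
    refine ⟨t, ht, l, hl, k, ⟨by omega, by omega⟩, ⟨⟨?_, ?_⟩, ?_⟩, ?_⟩
    · rw [altRowVal matrix hw t l ht hl]
      exact hc1
    · rw [altRowVal matrix hw (t + k - 1) l (by omega) hl]
      exact hc3
    · rw [altColVal matrix t l ht hl]
      exact hc2
    · rw [altColVal matrix t (l + k - 1) ht (by omega)]
      exact hc4
  · rintro ⟨t, ht, l, hl, k, ⟨hk2, hkmin⟩, ⟨⟨hb1, hb2⟩, hb3⟩, hb4⟩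
    have hkl : k ≤ matrix.length - l := by omega
    have hkt : k ≤ matrix.length - t := by omega
    rw [altRowVal matrix hw t l ht hl] at hb1
    rw [altRowVal matrix hw (t + k - 1) l (by omega) hl] at hb2
    rw [altColVal matrix t l ht hl] at hb3
    rw [altColVal matrix t (l + k - 1) ht (by omega)] at hb4
    refine ⟨t, ht, l, hl, ?_⟩
    rw [pvWhile_iff (preComputeValues matrix) matrix.length t l (matrix.length + 1) 2
      (by omega)]
    exact ⟨k, hk2, hkl, hkt,
      (pvCheckA matrix hw t l k ht hl hk2 hkl hkt).mpr ⟨hb1, hb3, hb2, hb4⟩⟩
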